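-- pv_equiv track=rewrite | github.com/Rich43/rog | albums/4/problem17.py/code.py | is_phrase_palindrome
-- ===== SOURCE A (Python) =====
-- def is_phrase_palindrome(str):
--             '''(str) -> str
--             return true if palindrome
--             '''
--             filtered_str = ''
--             for letter in str:
--                     if letter.isalpha():
--                             filtered_str += letter
--             str = filtered_str.lower()
--
--             reverse_str = str[:: -1]
--             half_len =len(str) // 2
--             r_str = ''
--             f_str =''
--             for x in range(0, half_len):
--                 r_str += reverse_str[x]
--             for y in range(0, half_len):
--                 f_str += str[y]
--
--
--
--             return  r_str == f_str
-- ===== SOURCE B (Python) =====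
-- def is_phrase_palindrome(str):
--     s = [c.lower() for c in str if c.isalpha()]
--     i = 0
--     j = len(s) - 1
--     while i < j:
--         if s[i] != s[j]:
--             return False
--         i += 1
--         j -= 1
--     return True
-- ===== Notes on version B (the rewrite author's own statement) =====
-- stated objective: alternative
-- what changed: Replaces building a reversed copy plus two half-length prefix strings and comparing them with an in-place two-pointer scan (i from the front, j from the back) over the single filtered lowercased list, with early exit on the first mismatch.
import Mathlib
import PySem

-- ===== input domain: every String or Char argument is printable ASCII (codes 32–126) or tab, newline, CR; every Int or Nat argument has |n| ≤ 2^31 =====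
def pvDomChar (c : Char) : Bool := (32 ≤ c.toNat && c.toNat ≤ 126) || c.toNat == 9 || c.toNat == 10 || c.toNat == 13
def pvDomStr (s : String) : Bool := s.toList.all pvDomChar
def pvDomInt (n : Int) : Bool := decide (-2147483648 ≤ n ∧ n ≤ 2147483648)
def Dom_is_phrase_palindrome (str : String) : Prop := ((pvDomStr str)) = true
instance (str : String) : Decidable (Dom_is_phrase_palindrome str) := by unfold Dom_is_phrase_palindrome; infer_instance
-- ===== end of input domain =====

-- B replaces A's reversed copy + two half-length prefix strings with a two-pointer scan over one
-- filtered lowercased list (objective: alternative; early exit, no reversed/prefix copies).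

-- ===== PORT A =====
def is_phrase_palindrome (str : String) : Bool :=
  let filtered := str.toList.foldl
    (fun acc c => if PySem.Chars.isalpha c then acc ++ [c] else acc) []
  let s := PySem.Chars.lower filtered
  let reverse_str := (PySem.List.slice? s none none (-1)).getD []   -- s[::-1]; step -1 never raises
  let half_len := PySem.Int.floordiv (PySem.List.len s) 2
  let r_str := (PySem.List.pyRange 0 half_len 1).foldl
    (fun acc x => acc ++ [PySem.List.pyGetD reverse_str x ' ']) []  -- indices 0..half_len-1 are in range
  let f_str := (PySem.List.pyRange 0 half_len 1).foldl
    (fun acc y => acc ++ [PySem.List.pyGetD s y ' ']) []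
  r_str == f_str

-- ===== PORT B =====
-- the 'while i < j' two-pointer loop of Source B
def pvPalScan (s : List Char) (i j : Nat) : Bool :=
  if h : i < j then
    if s.getD i ' ' != s.getD j ' ' then false
    else pvPalScan s (i + 1) (j - 1)
  else true
termination_by j - i
decreasing_by omega

def is_phrase_palindrome_alt (str : String) : Bool :=
  let s := (str.toList.filter PySem.Chars.isalpha).map PySem.Chars.lowerChar
  pvPalScan s 0 (s.length - 1)

-- ===== PRECONDITION & SPEC =====
def Spec_is_phrase_palindrome (str : String) (out : Bool) : Prop := out = is_phrase_palindrome_alt str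
instance (str : String) (out : Bool) : Decidable (Spec_is_phrase_palindrome str out) := by unfold Spec_is_phrase_palindrome; infer_instance

-- ===== CLAIM (what is proved, stated in full; the proofs are below) =====
def Claim_equal_is_phrase_palindrome : Prop := ∀ (str : String), Dom_is_phrase_palindrome str → Spec_is_phrase_palindrome str (is_phrase_palindrome str)

-- ===== LEMMAS AND PROOFS =====

-- floor division of a Nat cast by 2 is Nat division
theorem pv_floordiv_two (n : Nat) : PySem.Int.floordiv (n : Int) 2 = ((n / 2 : Nat) : Int) := by
  rw [PySem.Int.floordiv, Int.fdiv_eq_ediv]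
  simp

-- '[xs[j] for j in range(0, h)]' is xs.take h when h ≤ len xs
theorem pv_map_range_getD {α : Type} (xs : List α) (d : α) (h : Nat) (hh : h ≤ xs.length) :
    (PySem.List.pyRange 0 (h : Int) 1).map (fun j => PySem.List.pyGetD xs j d) = xs.take h := by
  rw [PySem.List.pyRange_zero_natCast, List.map_map]
  apply List.ext_getElem
  · simp [Nat.min_eq_left hh]
  · intro i h1 h2
    simp only [List.getElem_map, List.getElem_range, Function.comp_apply,
      PySem.List.pyGetD_natCast, List.getElem_take]
    have hi : i < xs.length := by simp at h1; omega
    simp [List.getD_eq_getElem?_getD, List.getElem?_eq_getElem hi]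

-- the two-pointer loop checks exactly the pairs (k, i+j-k) with i ≤ k and 2k < i+j
theorem pv_scan_iff (s : List Char) (i j : Nat) :
    pvPalScan s i j = true ↔
      (∀ k, i ≤ k → 2 * k < i + j → s.getD k ' ' = s.getD (i + j - k) ' ') := by
  by_cases h : i < j
  · rw [pvPalScan]
    simp only [h, dite_true]
    by_cases he : s.getD i ' ' = s.getD j ' '
    · have ih := pv_scan_iff s (i + 1) (j - 1)
      have hij : i + 1 + (j - 1) = i + j := by omega
      rw [hij] at ih
      simp only [he, bne_self_eq_false, Bool.false_eq_true, if_false]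
      rw [ih]
      constructor
      · intro H k hk h2
        rcases Nat.eq_or_lt_of_le hk with heq | hk'
        · rw [← heq]
          have hj : i + j - i = j := by omega
          rw [hj]; exact he
        · exact H k hk' h2
      · intro H k hk h2
        exact H k (by omega) h2
    · simp only [bne_iff_ne, ne_eq, he, not_false_eq_true, if_true]
      constructor
      · intro hf; exact absurd hf (by simp)
      · intro H
        exact absurd (H i (le_refl i) (by omega)) (by
          have : i + j - i = j := by omega
          rw [this]; exact he)
  · rw [pvPalScan]
    simp only [h, dite_false]
    constructor
    · intro _ k hk h2; exact absurd h2 (by omega)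
    · intro _; trivial
termination_by j - i
decreasing_by omega

-- half-prefix comparison against the reverse ↔ the two-pointer pair condition
theorem pv_take_iff (t : List Char) :
    t.reverse.take (t.length / 2) = t.take (t.length / 2) ↔
      (∀ k, 0 ≤ k → 2 * k < 0 + (t.length - 1) →
        t.getD k ' ' = t.getD (0 + (t.length - 1) - k) ' ') := by
  constructor
  · intro hEq k _ h2
    have hk : k < t.length / 2 := by omega
    have hkn : k < t.length := by omega
    have hmn : t.length - 1 - k < t.length := by omega
    have hlen : k < (t.reverse.take (t.length / 2)).length := by
      simp [Nat.min_eq_left (by omega : t.length / 2 ≤ t.length)]; omega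
    have := List.getElem_of_eq hEq hlen
    rw [List.getElem_take, List.getElem_take, List.getElem_reverse] at this
    simp only [Nat.zero_add]
    rw [List.getD_eq_getElem?_getD, List.getD_eq_getElem?_getD,
      List.getElem?_eq_getElem hkn, List.getElem?_eq_getElem hmn]
    simp [this]
  · intro H
    apply List.ext_getElem
    · simp
    · intro i h1 h2
      rw [List.getElem_take, List.getElem_take, List.getElem_reverse]
      have hi : i < t.length / 2 := by
        simp [Nat.min_eq_left (by omega : t.length / 2 ≤ t.length)] at h2; omega
      have hkn : i < t.length := by omega
      have hmn : t.length - 1 - i < t.length := by omega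
      have hEq := H i (by omega) (by omega)
      simp only [Nat.zero_add] at hEq
      rw [List.getD_eq_getElem?_getD, List.getD_eq_getElem?_getD,
        List.getElem?_eq_getElem hkn, List.getElem?_eq_getElem hmn] at hEq
      simp only [Option.getD_some] at hEq
      exact hEq.symm

-- ===== VERDICT (by name: the statement is the Claim_ definition above) =====
theorem is_phrase_palindrome_spec : Claim_equal_is_phrase_palindrome := by
  intro str _
  unfold Spec_is_phrase_palindrome is_phrase_palindrome is_phrase_palindrome_alt
  simp only [PySem.List.foldl_append_if_eq_filter, List.nil_append, PySem.Chars.lower,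
    PySem.List.slice?_none_none_neg_one, Option.getD_some, PySem.List.len_eq,
    pv_floordiv_two, PySem.List.foldl_append_singleton_eq_map]
  set t := (str.toList.filter PySem.Chars.isalpha).map PySem.Chars.lowerChar with ht
  rw [pv_map_range_getD t.reverse ' ' (t.length / 2) (by simp; omega),
      pv_map_range_getD t ' ' (t.length / 2) (by omega)]
  rw [Bool.eq_iff_iff]
  simp only [beq_iff_eq]
  rw [pv_take_iff, pv_scan_iff]
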